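-- pv_equiv track=rewrite | github.com/silox/sda-algorithms | revision/list_tasks.py | is_doubled
-- ===== SOURCE A (Python) =====
-- def is_doubled(array):
--     for i, val1 in enumerate(array):
--         for j, val2 in enumerate(array):
--             if i == j:
--                 continue
--             if val1 == val2 * 2 or val1 * 2 == val2:
--                 return True
--     return False
-- ===== SOURCE B (Python) =====
-- def is_doubled(array):
--     seen = set()
--     for v in array:
--         if 2 * v in seen or (v % 2 == 0 and v // 2 in seen):
--             return True
--         seen.add(v)
--     return False
-- ===== Notes on version B (the rewrite author's own statement) =====
-- stated objective: faster
-- what changed: Replaced the nested O(n^2) index scan with a single streaming pass that keeps a hash set of previously seen values and checks 2*v (and v/2 when v is even) against it, so the inner scan disappears.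
import Mathlib
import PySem

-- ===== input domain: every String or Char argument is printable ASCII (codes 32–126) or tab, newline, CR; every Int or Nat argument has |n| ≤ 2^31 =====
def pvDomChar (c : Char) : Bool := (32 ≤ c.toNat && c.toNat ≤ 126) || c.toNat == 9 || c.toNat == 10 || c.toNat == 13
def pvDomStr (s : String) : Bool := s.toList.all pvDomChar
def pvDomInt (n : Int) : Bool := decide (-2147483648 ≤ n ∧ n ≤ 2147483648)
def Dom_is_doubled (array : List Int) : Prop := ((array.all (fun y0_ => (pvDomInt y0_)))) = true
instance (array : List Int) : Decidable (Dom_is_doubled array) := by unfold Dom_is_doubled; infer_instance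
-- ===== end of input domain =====

-- B replaces A's nested quadratic scan by one pass with a set of previously seen values (objective: faster).

-- ===== PORT A =====
-- inner 'for j, val2 in enumerate(array)' loop of A
def aInner (i : Int) (val1 : Int) : List (Int × Int) → Bool
  | [] => false
  | (j, val2) :: rest =>
    if i == j then aInner i val1 rest
    else if val1 == val2 * 2 || val1 * 2 == val2 then true
    else aInner i val1 rest

-- outer 'for i, val1 in enumerate(array)' loop of A
def aOuter (pairs : List (Int × Int)) : List (Int × Int) → Bool
  | [] => false
  | (i, val1) :: rest => if aInner i val1 pairs then true else aOuter pairs rest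

def is_doubled (array : List Int) : Bool :=
  aOuter (PySem.List.enumerate array) (PySem.List.enumerate array)

-- ===== PORT B =====
-- B's single pass: 'seen' is the set of values already visited
def bLoop (seen : PySem.Set Int) : List Int → Bool
  | [] => false
  | v :: rest =>
    if PySem.Set.contains seen (2 * v)
       || (PySem.Int.mod v 2 == 0 && PySem.Set.contains seen (PySem.Int.floordiv v 2)) then true
    else bLoop (PySem.Set.add seen v) rest

def is_doubled_alt (array : List Int) : Bool := bLoop PySem.Set.empty array

-- ===== PRECONDITION & SPEC =====
def Spec_is_doubled (array : List Int) (out : Bool) : Prop := out = is_doubled_alt array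
instance (array : List Int) (out : Bool) : Decidable (Spec_is_doubled array out) := by unfold Spec_is_doubled; infer_instance

-- ===== CLAIM (what is proved, stated in full; the proofs are below) =====
def Claim_equal_is_doubled : Prop := ∀ (array : List Int), Dom_is_doubled array → Spec_is_doubled array (is_doubled array)

-- ===== LEMMAS AND PROOFS =====

-- symmetric "one is the double of the other" relation
def Sx (x y : Int) : Prop := x = 2 * y ∨ y = 2 * x

theorem Sx_symm {x y : Int} (h : Sx x y) : Sx y x := h.symm

-- "some element is paired with a later element"
def Q : List Int → Prop
  | [] => False
  | x :: xs => (∃ y ∈ xs, Sx x y) ∨ Q xs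

theorem aInner_iff (i v : Int) (l : List (Int × Int)) :
    aInner i v l = true ↔ ∃ p ∈ l, p.1 ≠ i ∧ Sx v p.2 := by
  induction l with
  | nil => simp [aInner]
  | cons q rest ih =>
    obtain ⟨j, w⟩ := q
    by_cases hij : i = j
    · have hstep : aInner i v ((j, w) :: rest) = aInner i v rest := by
        simp [aInner, hij]
      rw [hstep, ih]
      constructor
      · rintro ⟨p, hp, h⟩; exact ⟨p, List.mem_cons_of_mem _ hp, h⟩
      · rintro ⟨p, hp, h1, h2⟩
        rcases List.mem_cons.mp hp with h | h
        · subst h; simp [hij] at h1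
        · exact ⟨p, h, h1, h2⟩
    · by_cases hm : v = w * 2 ∨ v * 2 = w
      · have hstep : aInner i v ((j, w) :: rest) = true := by
        
          rcases hm with h | h <;> simp [aInner, hij, h]
        rw [hstep]
        simp only [true_iff]
        refine ⟨(j, w), List.mem_cons_self, by simpa using Ne.symm hij, ?_⟩
        unfold Sx; rcases hm with h | h
        · left; linarith
        · right; linarith
      · have hstep : aInner i v ((j, w) :: rest) = aInner i v rest := by
          push Not at hm
          simp [aInner, hij, hm.1, hm.2]
        rw [hstep, ih]
        constructor
        · rintro ⟨p, hp, h⟩; exact ⟨p, List.mem_cons_of_mem _ hp, h⟩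
        · rintro ⟨p, hp, h1, h2⟩
          rcases List.mem_cons.mp hp with h | h
          · subst h; exfalso; push Not at hm
            rcases h2 with h2 | h2
            · exact hm.1 (by linarith)
            · exact hm.2 (by linarith)
          · exact ⟨p, h, h1, h2⟩

theorem aOuter_iff (pairs : List (Int × Int)) (l : List (Int × Int)) :
    aOuter pairs l = true ↔ ∃ p ∈ l, aInner p.1 p.2 pairs = true := by
  induction l with
  | nil => simp [aOuter]
  | cons q rest ih =>
    obtain ⟨i, v⟩ := q
    by_cases h : aInner i v pairs = true
    · have hstep : aOuter pairs ((i, v) :: rest) = true := by simp [aOuter, h]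
      rw [hstep]
      simp only [true_iff]
      exact ⟨(i, v), List.mem_cons_self, h⟩
    · have hstep : aOuter pairs ((i, v) :: rest) = aOuter pairs rest := by
        simp [aOuter, h]
      rw [hstep, ih]
      constructor
      · rintro ⟨p, hp, hh⟩; exact ⟨p, List.mem_cons_of_mem _ hp, hh⟩
      · rintro ⟨p, hp, hh⟩
        rcases List.mem_cons.mp hp with he | he
        · subst he; exact absurd hh h
        · exact ⟨p, he, hh⟩

-- A returns true ↔ two distinct indices carry values in relation Sx
theorem isDoubled_iff (l : List Int) :
    is_doubled l = true ↔
      ∃ (k k' : Nat), k ≠ k' ∧ ∃ (hk : k < l.length) (hk' : k' < l.length), Sx l[k] l[k'] := by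
  unfold is_doubled
  rw [aOuter_iff]
  constructor
  · rintro ⟨p, hp, hin⟩
    rw [aInner_iff] at hin
    obtain ⟨q, hq, hne, hs⟩ := hin
    obtain ⟨k, hk, rfl⟩ := (PySem.List.mem_enumerate_iff _ _ _).mp hp
    obtain ⟨k', hk', rfl⟩ := (PySem.List.mem_enumerate_iff _ _ _).mp hq
    refine ⟨k, k', ?_, hk, hk', ?_⟩
    · intro h; apply hne; simp [h]
    · simpa using hs
  · rintro ⟨k, k', hne, hk, hk', hs⟩
    refine ⟨((0 : Int) + k, l[k]), (PySem.List.mem_enumerate_iff _ _ _).mpr ⟨k, hk, rfl⟩, ?_⟩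
    rw [aInner_iff]
    refine ⟨((0 : Int) + k', l[k']), (PySem.List.mem_enumerate_iff _ _ _).mpr ⟨k', hk', rfl⟩, ?_, by simpa using hs⟩
    simp only [zero_add, ne_eq, Int.natCast_inj]
    exact fun h => hne (h.symm)

-- Q ↔ two ordered indices carry values in relation Sx
theorem Q_iff (l : List Int) :
    Q l ↔ ∃ (k k' : Nat), k < k' ∧ ∃ (hk : k < l.length) (hk' : k' < l.length), Sx l[k] l[k'] := by
  induction l with
  | nil => simp [Q]
  | cons x xs ih =>
    simp only [Q, ih]
    constructor
    · rintro (⟨y, hy, hs⟩ | ⟨k, k', hlt, hk, hk', hs⟩)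
      · obtain ⟨m, hm, rfl⟩ := List.getElem_of_mem hy
        exact ⟨0, m + 1, Nat.succ_pos m, by simp, by simpa using Nat.succ_lt_succ hm, by simpa using hs⟩
      · exact ⟨k + 1, k' + 1, by omega, by simpa using Nat.succ_lt_succ hk,
          by simpa using Nat.succ_lt_succ hk', by simpa using hs⟩
    · rintro ⟨k, k', hlt, hk, hk', hs⟩
      match k, k' with
      | 0, (m + 1) =>
        left
        refine ⟨xs[m]'(by simpa using hk'), List.getElem_mem _, ?_⟩
        simpa using hs
      | (k + 1), (k' + 1) =>
        right
        exact ⟨k, k', by omega, by simpa using hk, by simpa using hk', by simpa using hs⟩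

-- distinct-pair form and ordered-pair form agree, by symmetry of Sx
theorem ne_iff_lt_pair (l : List Int) :
    (∃ (k k' : Nat), k ≠ k' ∧ ∃ (hk : k < l.length) (hk' : k' < l.length), Sx l[k] l[k'])
      ↔ (∃ (k k' : Nat), k < k' ∧ ∃ (hk : k < l.length) (hk' : k' < l.length), Sx l[k] l[k']) := by
  constructor
  · rintro ⟨k, k', hne, hk, hk', hs⟩
    rcases Nat.lt_or_ge k k' with h | h
    · exact ⟨k, k', h, hk, hk', hs⟩
    · have : k' < k := by omega
      exact ⟨k', k, this, hk', hk, Sx_symm hs⟩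
  · rintro ⟨k, k', hlt, hk, hk', hs⟩
    exact ⟨k, k', by omega, hk, hk', hs⟩

-- B's step condition, characterised
theorem bCond_iff (seen : PySem.Set Int) (v : Int) :
    (PySem.Set.contains seen (2 * v)
       || (PySem.Int.mod v 2 == 0 && PySem.Set.contains seen (PySem.Int.floordiv v 2))) = true
      ↔ ∃ w ∈ seen, Sx v w := by
  simp only [Bool.or_eq_true, Bool.and_eq_true, beq_iff_eq, PySem.Set.contains_iff]
  constructor
  · rintro (h | ⟨hmod, h⟩)
    · exact ⟨2 * v, h, Or.inr rfl⟩
    · refine ⟨PySem.Int.floordiv v 2, h, Or.inl ?_⟩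
      have := PySem.Int.floordiv_mul_add_mod v 2
      rw [hmod] at this; linarith
  · rintro ⟨w, hw, hs | hs⟩
    · right
      have hv : v = 2 * w := hs
      have hfd : PySem.Int.floordiv v 2 = w := by
        rw [hv, PySem.Int.floordiv_eq_iff_of_pos (by omega)]; omega
      have hm : PySem.Int.mod v 2 = 0 := by
        have := PySem.Int.floordiv_mul_add_mod v 2
        rw [hfd] at this; omega
      exact ⟨hm, hfd ▸ hw⟩
    · left; exact hs ▸ hw

theorem bLoop_iff (l : List Int) : ∀ (seen : PySem.Set Int),
    bLoop seen l = true ↔ (∃ v ∈ l, ∃ w ∈ seen, Sx v w) ∨ Q l := by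
  induction l with
  | nil => simp [bLoop, Q]
  | cons v rest ih =>
    intro seen
    by_cases hc : (PySem.Set.contains seen (2 * v)
       || (PySem.Int.mod v 2 == 0 && PySem.Set.contains seen (PySem.Int.floordiv v 2))) = true
    · have hstep : bLoop seen (v :: rest) = true := by
        simp only [bLoop]; rw [if_pos hc]
      rw [hstep]
      simp only [true_iff]
      left
      obtain ⟨w, hw, hs⟩ := (bCond_iff seen v).mp hc
      exact ⟨v, List.mem_cons_self, w, hw, hs⟩
    · have hnc : ¬ ∃ w ∈ seen, Sx v w := fun h => hc ((bCond_iff seen v).mpr h)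
      have hstep : bLoop seen (v :: rest) = bLoop (PySem.Set.add seen v) rest := by
        simp only [bLoop]
        rw [if_neg hc]
      rw [hstep, ih]
      constructor
      · rintro (⟨u, hu, w, hw, hs⟩ | hq)
        · rcases (PySem.Set.mem_add _ _ _).mp hw with hw' | hw'
          · exact Or.inl ⟨u, List.mem_cons_of_mem _ hu, w, hw', hs⟩
          · subst hw'
            exact Or.inr (Or.inl ⟨u, hu, Sx_symm hs⟩)
        · exact Or.inr (Or.inr hq)
      · rintro (⟨u, hu, w, hw, hs⟩ | hd)
        · rcases List.mem_cons.mp hu with he | he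
          · subst he; exact absurd ⟨w, hw, hs⟩ hnc
          · exact Or.inl ⟨u, he, w, (PySem.Set.mem_add _ _ _).mpr (Or.inl hw), hs⟩
        · rcases hd with ⟨y, hy, hs⟩ | hq
          · exact Or.inl ⟨y, hy, v, (PySem.Set.mem_add _ _ _).mpr (Or.inr rfl), Sx_symm hs⟩
          · exact Or.inr hq

theorem isDoubledAlt_iff (l : List Int) : is_doubled_alt l = true ↔ Q l := by
  unfold is_doubled_alt
  rw [bLoop_iff]
  simp [PySem.Set.empty]

-- ===== VERDICT (by name: the statement is the Claim_ definition above) =====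
theorem is_doubled_spec : Claim_equal_is_doubled := by
  intro array _
  unfold Spec_is_doubled
  rw [Bool.eq_iff_iff, isDoubled_iff, isDoubledAlt_iff, Q_iff, ne_iff_lt_pair]
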